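-- pv_equiv track=rewrite | github.com/Ko-udon/Algorithm-lv1 | pyalgo_알고리즘 베스트10 문제풀이/pyalgo_알고리즘_베스트10_문제풀이.py | solution
-- ===== SOURCE A (Python) =====
-- def solution(data):
--     sandwitch = '12341'
--
--     data_str = ''.join(map(str,data)) # 문자열로 바꾸기
--     count = 0
--     while sandwitch in data_str:
--         count+=1
--         data_str = data_str.replace(sandwitch, '', 1) # 샌드위치 패턴 제거, 한번만!
--     return count
-- ===== SOURCE B (Python) =====
-- def solution(data):
--     sandwitch = ['1', '2', '3', '4', '1']
--     s = ''.join(map(str, data))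
--     stack = []
--     count = 0
--     for ch in s:
--         stack.append(ch)
--         if stack[-5:] == sandwitch:
--             del stack[-5:]
--             count += 1
--     return count
-- ===== Notes on version B (the rewrite author's own statement) =====
-- stated objective: alternative
-- what changed: A repeatedly rescans the whole string and rebuilds it with replace('12341','',1) until no pattern remains; B makes a single left-to-right pass with a character stack, popping 5 characters and incrementing the count whenever the stack top reads '12341'.
import Mathlib
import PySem

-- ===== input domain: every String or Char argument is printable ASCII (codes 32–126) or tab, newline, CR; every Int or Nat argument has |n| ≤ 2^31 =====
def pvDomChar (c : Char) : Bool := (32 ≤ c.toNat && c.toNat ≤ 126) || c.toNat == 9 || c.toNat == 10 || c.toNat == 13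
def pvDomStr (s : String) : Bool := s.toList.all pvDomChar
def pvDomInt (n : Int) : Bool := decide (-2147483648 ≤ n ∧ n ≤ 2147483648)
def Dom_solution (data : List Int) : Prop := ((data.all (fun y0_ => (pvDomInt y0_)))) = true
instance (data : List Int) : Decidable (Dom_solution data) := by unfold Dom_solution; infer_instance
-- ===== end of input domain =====

-- B replaces A's repeated scan-and-remove over the whole string with a single left-to-right
-- stack pass that pops and counts whenever the stack top completes '12341'.

-- ===== PORT A =====
-- sandwitch = '12341'
def pvP : List Char := ['1', '2', '3', '4', '1']

-- data_str.replace('12341', '', 1): remove the FIRST occurrence; exact whenever '12341'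
-- occurs in s (the only situation in which A's loop calls it), since Chars.find points at
-- the first occurrence. Hand-ported because PySem.Str.replace has no max-count argument.
def pvRemoveFirst (s : List Char) : List Char :=
  let i := (PySem.Chars.find s pvP).toNat
  s.take i ++ s.drop (i + 5)

lemma pvRemoveFirst_length_lt (s : List Char) (h : PySem.Chars.isIn pvP s = true) :
    (pvRemoveFirst s).length < s.length := by
  have hinf : pvP <:+: s := (PySem.Chars.isIn_iff_infix pvP s).mp h
  have hnn : 0 ≤ PySem.Chars.find s pvP := (PySem.Chars.find_nonneg_iff s pvP).mpr hinf
  have hsp := (PySem.Chars.find_spec hnn).1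
  have hle : (PySem.Chars.find s pvP).toNat ≤ s.length := by
    have := PySem.Chars.find_le_length s pvP; omega
  have h5 : (PySem.Chars.find s pvP).toNat + 5 ≤ s.length := by
    have hsp5 := hsp.length_le
    rw [List.length_drop, show pvP.length = 5 from rfl] at hsp5
    omega
  unfold pvRemoveFirst
  simp only [List.length_append, List.length_take, List.length_drop]
  omega

-- while sandwitch in data_str: count += 1; data_str = data_str.replace(sandwitch, '', 1)
def pvALoop (s : List Char) (count : Int) : Int :=
  if PySem.Chars.isIn pvP s = true then pvALoop (pvRemoveFirst s) (count + 1) else count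
termination_by s.length
decreasing_by exact pvRemoveFirst_length_lt _ (by assumption)

def solution (data : List Int) : Int :=
  pvALoop (PySem.Chars.join [] (data.map PySem.Int.toChars)) 0

-- ===== PORT B =====
-- the stack is kept head-first (push = cons), so Python's stack[-5:] is `take 5`
-- compared against the reversed pattern, and `del stack[-5:]` is `drop 5`.
def pvPrev : List Char := ['1', '4', '3', '2', '1']

def pvBStep (acc : List Char × Int) (ch : Char) : List Char × Int :=
  let st := ch :: acc.1
  if st.take 5 = pvPrev then (st.drop 5, acc.2 + 1) else (st, acc.2)

def solution_alt (data : List Int) : Int :=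
  (List.foldl pvBStep ([], 0) (PySem.Chars.join [] (data.map PySem.Int.toChars))).2

-- ===== PRECONDITION & SPEC =====
def Spec_solution (data : List Int) (out : Int) : Prop := out = solution_alt data
instance (data : List Int) (out : Int) : Decidable (Spec_solution data out) := by unfold Spec_solution; infer_instance

-- ===== CLAIM (what is proved, stated in full; the proofs are below) =====
def Claim_equal_solution : Prop := ∀ (data : List Int), Dom_solution data → Spec_solution data (solution data)

-- ===== LEMMAS AND PROOFS =====

-- a pop condition fires exactly when pvP is a suffix of the scanned-so-far string
lemma take5_eq_prev_iff (x : List Char) : x.take 5 = pvPrev ↔ pvP <:+ x.reverse := by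
  have h1 : pvP <:+ x.reverse ↔ pvPrev <+: x := by
    rw [show pvP = pvPrev.reverse from by decide]
    exact List.reverse_suffix
  rw [h1, List.prefix_iff_eq_take, show pvPrev.length = 5 from rfl]
  exact eq_comm

-- K1: scanning w with no possible pop pushes everything and leaves the count unchanged
lemma scan_nopop (w : List Char) : ∀ (st : List Char) (c : Int),
    (∀ t, t <+: w → ¬ pvP <:+ (st.reverse ++ t)) →
    List.foldl pvBStep (st, c) w = (w.reverse ++ st, c) := by
  induction w with
  | nil => intro st c _; simp
  | cons ch w' ih =>
    intro st c h
    have hcond : ¬ ((ch :: st).take 5 = pvPrev) := by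
      intro hc
      exact h [ch] ⟨w', rfl⟩ (by simpa using (take5_eq_prev_iff (ch :: st)).mp hc)
    have hstep : pvBStep (st, c) ch = (ch :: st, c) := by
      simp only [pvBStep]; rw [if_neg hcond]
    show List.foldl pvBStep (pvBStep (st, c) ch) w' = _
    rw [hstep, ih (ch :: st) c (fun t ht => by
      have := h (ch :: t) ((List.cons_prefix_cons).mpr ⟨rfl, ht⟩)
      simpa using this)]
    simp

-- K2: scanning the pattern itself from a stack that cannot pop early pops exactly once, at its end
lemma scan_pattern (st : List Char) (c : Int) (v : List Char)
    (h : ∀ k, 1 ≤ k → k ≤ 4 → ¬ pvP <:+ (st.reverse ++ pvP.take k)) :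
    List.foldl pvBStep (st, c) (pvP ++ v) = List.foldl pvBStep (st, c + 1) v := by
  have h1 : pvBStep (st, c) '1' = ('1' :: st, c) := by
    simp only [pvBStep]; rw [if_neg]; intro hc
    exact h 1 (by omega) (by omega) (by simpa [pvP] using (take5_eq_prev_iff _).mp hc)
  have h2 : pvBStep ('1' :: st, c) '2' = ('2' :: '1' :: st, c) := by
    simp only [pvBStep]; rw [if_neg]; intro hc
    exact h 2 (by omega) (by omega) (by simpa [pvP] using (take5_eq_prev_iff _).mp hc)
  have h3 : pvBStep ('2' :: '1' :: st, c) '3' = ('3' :: '2' :: '1' :: st, c) := by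
    simp only [pvBStep]; rw [if_neg]; intro hc
    exact h 3 (by omega) (by omega) (by simpa [pvP] using (take5_eq_prev_iff _).mp hc)
  have h4 : pvBStep ('3' :: '2' :: '1' :: st, c) '4' = ('4' :: '3' :: '2' :: '1' :: st, c) := by
    simp only [pvBStep]; rw [if_neg]; intro hc
    exact h 4 (by omega) (by omega) (by simpa [pvP] using (take5_eq_prev_iff _).mp hc)
  have h5 : pvBStep ('4' :: '3' :: '2' :: '1' :: st, c) '1' = (st, c + 1) := by
    simp only [pvBStep]
    rw [if_pos (show List.take 5 ('1' :: '4' :: '3' :: '2' :: '1' :: st) = pvPrev by simp [pvPrev])]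
    simp
  show List.foldl pvBStep (st, c) ('1' :: '2' :: '3' :: '4' :: '1' :: v) = _
  simp only [List.foldl_cons, h1, h2, h3, h4, h5]

-- S: a pvP-suffix of a prefix of s is an occurrence of pvP in s
lemma occ_of_suffix_prefix (s t : List Char) (ht : t <+: s) (hs : pvP <:+ t) :
    5 ≤ t.length ∧ pvP <+: s.drop (t.length - 5) := by
  obtain ⟨t', rfl⟩ := hs
  obtain ⟨r, rfl⟩ := ht
  have hlen : (t' ++ pvP).length = t'.length + 5 := by simp [pvP]
  refine ⟨by omega, ?_⟩
  have hd : (t' ++ pvP ++ r).drop ((t' ++ pvP).length - 5) = pvP ++ r := by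
    rw [hlen, Nat.add_sub_cancel, List.append_assoc, List.drop_left]
  rw [hd]; exact ⟨r, rfl⟩

-- main invariant: the stack run from an empty stack counts exactly A's removals
lemma main_aux : ∀ (n : Nat) (s : List Char), s.length ≤ n → ∀ c : Int,
    (List.foldl pvBStep ([], c) s).2 = pvALoop s c := by
  intro n
  induction n with
  | zero =>
    intro s hs c
    have hnil : s = [] := List.eq_nil_of_length_eq_zero (by omega)
    subst hnil
    rw [pvALoop]
    norm_num [show PySem.Chars.isIn pvP [] = false from by decide]
  | succ n ih =>
    intro s hs c
    by_cases hIn : PySem.Chars.isIn pvP s = true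
    · have hinf : pvP <:+: s := (PySem.Chars.isIn_iff_infix pvP s).mp hIn
      have hnn : 0 ≤ PySem.Chars.find s pvP := (PySem.Chars.find_nonneg_iff s pvP).mpr hinf
      obtain ⟨hocc, hmin⟩ := PySem.Chars.find_spec hnn
      set i := (PySem.Chars.find s pvP).toNat with hi
      obtain ⟨r, hr⟩ := hocc
      have hile : i ≤ s.length := by
        have := PySem.Chars.find_le_length s pvP; omega
      have hs_eq : s = s.take i ++ (pvP ++ r) := by rw [hr, List.take_append_drop]
      have hulen : (s.take i).length = i := by simp [List.length_take]; omega
      have hslen : s.length = i + 5 + r.length := by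
        conv_lhs => rw [hs_eq]
        simp [pvP, hulen]; omega
      -- any pvP-suffix of a prefix of s of length < i + 5 contradicts minimality of i
      have key : ∀ t, t <+: s → pvP <:+ t → i + 5 ≤ t.length := by
        intro t ht hsuf
        obtain ⟨h5, hocc'⟩ := occ_of_suffix_prefix s t ht hsuf
        by_contra hlt
        exact hmin (t.length - 5) (by omega) hocc'
      -- (a) no pop while scanning s.take i
      have hnpa : ∀ t, t <+: s.take i → ¬ pvP <:+ (([] : List Char).reverse ++ t) := by
        intro t ht hsuf
        have hts : t <+: s := ht.trans (List.take_prefix i s)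
        have := key t hts (by simpa using hsuf)
        have : t.length ≤ i := by
          have := ht.length_le; omega
        omega
      -- (b) no early pop while scanning pvP from stack (s.take i).reverse
      have hnpb : ∀ k, 1 ≤ k → k ≤ 4 → ¬ pvP <:+ ((s.take i).reverse.reverse ++ pvP.take k) := by
        intro k hk1 hk4 hsuf
        have htp : s.take i ++ pvP.take k <+: s := by
          refine ⟨pvP.drop k ++ r, ?_⟩
          conv_rhs => rw [hs_eq]
          simp only [List.append_assoc]
          congr 1
          rw [← List.append_assoc, List.take_append_drop]
        have := key _ htp (by simpa using hsuf)
        have hlk : (s.take i ++ pvP.take k).length = i + k := by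
          simp [hulen, pvP]
          omega
        omega
      have hr' : s.drop (i + 5) = r := by
        have h0 : (s.drop i).drop 5 = r := by rw [← hr]; simp [pvP]
        rw [List.drop_drop] at h0
        exact h0
      have hrm : pvRemoveFirst s = s.take i ++ r := by
        simp only [pvRemoveFirst, ← hi, hr']
      have hlen' : (s.take i ++ r).length ≤ n := by
        simp [hulen]; omega
      -- left side
      have hL : (List.foldl pvBStep ([], c) s).2
          = (List.foldl pvBStep ((s.take i).reverse, c + 1) r).2 := by
        conv_lhs => rw [hs_eq]
        rw [List.foldl_append, scan_nopop _ _ _ hnpa]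
        rw [show (s.take i).reverse ++ [] = (s.take i).reverse from by simp]
        rw [scan_pattern _ _ _ (by simpa using hnpb)]
      -- right side via the induction hypothesis
      have hR : (List.foldl pvBStep ([], c + 1) (s.take i ++ r)).2
          = (List.foldl pvBStep ((s.take i).reverse, c + 1) r).2 := by
        rw [List.foldl_append, scan_nopop _ _ _ hnpa]
        rw [show (s.take i).reverse ++ [] = (s.take i).reverse from by simp]
      rw [pvALoop, if_pos hIn, hrm, ← ih _ hlen' (c + 1), hL, hR]
    · rw [pvALoop, if_neg hIn]
      have hnp : ∀ t, t <+: s → ¬ pvP <:+ (([] : List Char).reverse ++ t) := by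
        intro t ht hsuf
        simp at hsuf
        exact hIn ((PySem.Chars.isIn_iff_infix pvP s).mpr (hsuf.isInfix.trans ht.isInfix))
      rw [scan_nopop _ _ _ hnp]

theorem solution_eq_alt (data : List Int) : solution data = solution_alt data := by
  unfold solution solution_alt
  exact (main_aux _ _ (le_refl _) 0).symm

-- ===== VERDICT (by name: the statement is the Claim_ definition above) =====
theorem solution_spec : Claim_equal_solution := by
  intro data _
  unfold Spec_solution
  exact solution_eq_alt data
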